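-- pv_equiv track=rewrite | github.com/hogiljung/Algorithms | 프로그래머스/2/42860. 조이스틱/조이스틱.py | solution
-- ===== SOURCE A (Python) =====
-- def solution(name):
-- #     answer = 0
--
-- #     # 위아래로 움직이는 최소 횟수 맵핑.
-- #     num_char = [i for i in range(14)] + [j for j in range(12, 0, -1)]
--
-- #     n = len(name)
-- #     # 좌우로 움직이는 최소 횟수는 문자열의 수.
-- #     move = n - 1
--
-- #     for right in range(n):
-- #         # 위아래 움직이는 수 계산 후 더해준다.
-- #         answer += num_char[ord(name[right]) - ord('A')]
-- #         # 다음으로 A가 아닌 인덱스를 찾기 위한 변수 선언.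
-- #         next_a_idx = right + 1
-- #         # A가 아닌 문자를 찾을 때까지 인덱스를 늘린다.
-- #         while (next_a_idx < n) and (name[next_a_idx] == 'A'):
-- #             next_a_idx += 1
-- #         left = n - next_a_idx
-- #         # 현재 위치로의 이동거리와 다음으로 A가 아닌 문자의 문자의 끝에서부터 거리를 비교하여 작은걸 찾는다.
-- #         # 이걸 통해 다음 변경할 A가 현재 위치에서 오른쪽으로 가는게 빠른지 왼쪽에서 가는게 빠른지 알 수 있다.
-- #         move = min(move, min(right + right + left, left + left + right))
--
-- #     answer += move
--
-- #     return answer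
--     n = len(name)
--     answer = 0
--
--     # 각 위치별 알파벳 변경 횟수 계산
--     change_counts = [min(ord(char) - ord('A'), ord('Z') - ord(char) + 1) for char in name]
--     answer += sum(change_counts)
--
--     # 최적의 커서 이동 계산
--     min_move = n - 1  # 기본적으로 오른쪽으로 쭉 가는 경우
--     for i in range(n):
--         # 오른쪽에서 가장 가까운 A가 아닌 문자의 인덱스를 찾는다.
--         next_index = i + 1
--         while next_index < n and name[next_index] == 'A':
--             next_index += 1
--         # 위의 인덱스를 이용해 아래 두가지 이동 경우의 거리를 계산한다.
--         # 1. 오른쪽으로 갔다가 다시 왼쪽으로 돌아오는 경우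
--         right_then_left = i + i + n - next_index
--         # 2. 왼쪽으로 갔다가 다시 오른쪽으로 돌아오는 경우
--         left_then_right = i + (n - next_index) + (n - next_index)
--         min_move = min(min_move, right_then_left, left_then_right)
--
--     answer += min_move
--     return answer
-- ===== SOURCE B (Python) =====
-- def solution(name):
--     n = len(name)
--     total = 0
--     # nge[i] = smallest index j >= i with name[j] != 'A', or n; one backward pass
--     nge = [n] * (n + 1)
--     for i in range(n - 1, -1, -1):
--         o = ord(name[i])
--         total += min(o - 65, 91 - o)
--         nge[i] = i if name[i] != 'A' else nge[i + 1]
--     best = n - 1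
--     for i in range(n):
--         k = n - nge[i + 1]
--         best = min(best, 2 * i + k, i + 2 * k)
--     return total + best
-- ===== Notes on version B (the rewrite author's own statement) =====
-- stated objective: alternative
-- what changed: Replaced the per-position inner while-scan for the next non-'A' character with a single backward pass that precomputes that index for every position, so the min loop is one pass with no inner scan.
import Mathlib
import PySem

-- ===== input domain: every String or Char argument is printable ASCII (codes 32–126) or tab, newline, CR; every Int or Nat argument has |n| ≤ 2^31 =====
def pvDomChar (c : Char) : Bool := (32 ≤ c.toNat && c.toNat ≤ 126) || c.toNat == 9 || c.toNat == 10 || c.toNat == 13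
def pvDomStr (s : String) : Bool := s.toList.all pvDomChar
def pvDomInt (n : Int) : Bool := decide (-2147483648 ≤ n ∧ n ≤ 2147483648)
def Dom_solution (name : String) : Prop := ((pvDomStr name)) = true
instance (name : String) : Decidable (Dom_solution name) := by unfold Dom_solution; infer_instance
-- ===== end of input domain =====

-- B replaces A's inner while-scan for the next non-'A' character by a single backward
-- pass precomputing that index per position, then one min loop with no inner scan.

-- ===== PORT A =====

-- A's inner 'while next_index < n and name[next_index] == "A": next_index += 1'
def whileNextA (cs : List Char) (j : Nat) : Nat :=
  if h : j < cs.length then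
    if cs[j] = 'A' then whileNextA cs (j + 1) else j
  else j
termination_by cs.length - j

def solution (name : String) : Int :=
  let cs := name.toList
  let n := cs.length
  let changeCounts := cs.map (fun c => min ((c.toNat : Int) - 65) (90 - (c.toNat : Int) + 1))
  let answer : Int := 0 + changeCounts.sum
  let minMove := (List.range n).foldl (fun m i =>
      let ni := whileNextA cs (i + 1)
      min (min m ((i : Int) + (i : Int) + (n : Int) - (ni : Int)))
          ((i : Int) + ((n : Int) - (ni : Int)) + ((n : Int) - (ni : Int)))) ((n : Int) - 1)
  answer + minMove

-- ===== PORT B =====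

-- B's backward 'for i in range(n-1, -1, -1)' loop: accumulates the letter-change total
-- and builds the list nge (nge[i] = first index j ≥ i with name[j] ≠ 'A', else n).
def bPass (cs : List Char) (off : Nat) (n : Nat) : Int × List Nat :=
  match cs with
  | [] => (0, [n])
  | c :: rest =>
    let p := bPass rest (off + 1) n
    (p.1 + min ((c.toNat : Int) - 65) (91 - (c.toNat : Int)),
     (if c ≠ 'A' then off else p.2.headD n) :: p.2)

def solution_alt (name : String) : Int :=
  let cs := name.toList
  let n := cs.length
  let p := bPass cs 0 n
  let best := (List.range n).foldl (fun b i =>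
      let k : Int := (n : Int) - ((p.2.getD (i + 1) n : Nat) : Int)
      min (min b (2 * (i : Int) + k)) ((i : Int) + 2 * k)) ((n : Int) - 1)
  p.1 + best

-- ===== PRECONDITION & SPEC =====
def Spec_solution (name : String) (out : Int) : Prop := out = solution_alt name
instance (name : String) (out : Int) : Decidable (Spec_solution name out) := by unfold Spec_solution; infer_instance

-- ===== CLAIM (what is proved, stated in full; the proofs are below) =====
def Claim_equal_solution : Prop := ∀ (name : String), Dom_solution name → Spec_solution name (solution name)

-- ===== LEMMAS AND PROOFS =====

-- mathematical description of "first non-'A' index": fnA cs off = off + (leading run of 'A's in cs)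
def fnA : List Char → Nat → Nat
  | [], off => off
  | c :: rest, off => if c = 'A' then fnA rest (off + 1) else off

theorem whileNextA_eq (cs : List Char) (j : Nat) : whileNextA cs j = fnA (cs.drop j) j := by
  rw [whileNextA]
  split
  · rename_i h
    rw [List.drop_eq_getElem_cons h]
    simp only [fnA]
    split
    · exact whileNextA_eq cs (j + 1)
    · rfl
  · rename_i h
    rw [List.drop_eq_nil_iff.mpr (by omega)]
    rfl
termination_by cs.length - j

theorem bPass_fst (cs : List Char) (off n : Nat) :
    (bPass cs off n).1 = (cs.map (fun c => min ((c.toNat : Int) - 65) (90 - (c.toNat : Int) + 1))).sum := by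
  induction cs generalizing off with
  | nil => simp [bPass]
  | cons c rest ih =>
    simp only [bPass, List.map_cons, List.sum_cons, ih]
    have : (91 : Int) - (c.toNat : Int) = 90 - (c.toNat : Int) + 1 := by ring
    rw [this]; ring

theorem bPass_ne_nil (cs : List Char) (off n : Nat) : (bPass cs off n).2 ≠ [] := by
  cases cs <;> simp [bPass]

theorem bPass_snd (cs : List Char) (off n k : Nat) (hn : off + cs.length = n)
    (hk : k ≤ cs.length) : (bPass cs off n).2.getD k n = fnA (cs.drop k) (off + k) := by
  induction cs generalizing off k with
  | nil =>
    simp only [List.length_nil, Nat.le_zero] at hk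
    subst hk
    simp only [List.length_nil, Nat.add_zero] at hn
    subst hn
    simp [bPass, fnA]
  | cons c rest ih =>
    cases k with
    | zero =>
      simp only [bPass, List.drop_zero, List.getD_cons_zero, fnA, Nat.add_zero]
      by_cases hc : c = 'A'
      · subst hc
        rw [if_neg (show ¬('A' ≠ 'A') by simp), if_pos rfl]
        have hh : ((bPass rest (off + 1) n).2).headD n = ((bPass rest (off + 1) n).2).getD 0 n := by
          cases hcc : (bPass rest (off + 1) n).2 with
          | nil => exact absurd hcc (bPass_ne_nil rest (off + 1) n)
          | cons a l => rfl
        rw [hh, ih (off + 1) 0 (by simp at hn; omega) (Nat.zero_le _)]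
        simp
      · simp [hc]
    | succ k' =>
      simp only [bPass, List.getD_cons_succ, List.drop_succ_cons]
      rw [ih (off + 1) k' (by simp at hn; omega) (by simp at hk; omega)]
      congr 1
      omega

theorem solution_eq_alt (name : String) : solution name = solution_alt name := by
  unfold solution solution_alt
  simp only []
  rw [bPass_fst]
  congr 1
  · simp
  · apply PySem.List.foldl_congr_mem
    intro m i hi
    have hin : i < name.toList.length := by simpa using List.mem_range.mp hi
    have h1 : (bPass name.toList 0 name.toList.length).2.getD (i + 1) name.toList.length
        = fnA (name.toList.drop (i + 1)) (0 + (i + 1)) :=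
      bPass_snd name.toList 0 name.toList.length (i + 1) (by omega) (by omega)
    rw [whileNextA_eq, h1]
    simp only [Nat.zero_add]
    congr 1
    · congr 1
      ring
    · ring

-- ===== VERDICT (by name: the statement is the Claim_ definition above) =====
theorem solution_spec : Claim_equal_solution := by
  intro name _
  unfold Spec_solution
  exact solution_eq_alt name
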